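-- pv_equiv track=rewrite | github.com/Anonymous-replication-7/False-Positive-from-Linux-Kernel | analyse/rq3/root_cause_component.py | merge_jsonl_data
-- ===== SOURCE A (Python) =====
-- def merge_jsonl_data(data1, data2):
--     merged_data = {}
--     components = ["File System", "Drivers", "Networking", "Kernel Core", "Tools","Security", "IO/Storage"]
--
--     for data in [data1, data2]:
--         for component, causes in data.items():
--             if component not in merged_data and component in components:
--                 merged_data[component] = {}
--             if component in components:
--                 for cause, count in causes.items():
--                     if cause not in merged_data[component]:
--                         merged_data[component][cause] = 0
--
--                     merged_data[component][cause] += count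
--
--     return merged_data
-- ===== SOURCE B (Python) =====
-- def merge_jsonl_data(data1, data2):
--     components = ["File System", "Drivers", "Networking", "Kernel Core", "Tools","Security", "IO/Storage"]
--     sources = (data1, data2)
--     # pass 1: the output's component order = first appearance of each allowed component
--     order = []
--     for d in sources:
--         for component in d:
--             if component in components and component not in order:
--                 order.append(component)
--     # pass 2: for each component in that order, gather and sum its causes from both sources
--     merged_data = {}
--     for component in order:
--         causes = {}
--         for d in sources:
--             for cause, count in d.get(component, {}).items():
--                 causes[cause] = causes.get(cause, 0) + count
--         merged_data[component] = causes
--     return merged_data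
-- ===== Notes on version B (the rewrite author's own statement) =====
-- stated objective: alternative
-- what changed: B inverts A's data-first nesting into a component-first, two-staged pass: first a scan of both inputs fixes the output's component order, then for each ordered component its causes are gathered by dict lookups d.get(component, {}) and summed into a fresh dict, so no merged accumulator nested dict is threaded through the input scan.
import Mathlib
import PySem

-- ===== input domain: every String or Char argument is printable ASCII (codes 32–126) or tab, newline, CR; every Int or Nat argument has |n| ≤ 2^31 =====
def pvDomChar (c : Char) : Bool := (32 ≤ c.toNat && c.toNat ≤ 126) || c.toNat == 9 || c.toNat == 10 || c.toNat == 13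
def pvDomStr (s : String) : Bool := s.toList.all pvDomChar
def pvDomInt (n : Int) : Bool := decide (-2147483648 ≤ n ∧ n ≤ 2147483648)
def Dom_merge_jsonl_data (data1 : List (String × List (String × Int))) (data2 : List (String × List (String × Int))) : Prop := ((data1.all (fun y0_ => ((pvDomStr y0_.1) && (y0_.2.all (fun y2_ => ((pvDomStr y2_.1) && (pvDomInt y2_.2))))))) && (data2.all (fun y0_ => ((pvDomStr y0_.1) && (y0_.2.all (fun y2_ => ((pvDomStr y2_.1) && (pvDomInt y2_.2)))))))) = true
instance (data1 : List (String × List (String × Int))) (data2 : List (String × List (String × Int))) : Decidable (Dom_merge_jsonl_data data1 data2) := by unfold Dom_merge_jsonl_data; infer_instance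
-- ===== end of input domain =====

-- B groups component-first (fix the output key order, then gather each component's causes by lookup) instead of A's data-first accumulation; alternative decomposition, same cost.

-- ===== PORT A =====
def pvComponents : List String :=
  ["File System", "Drivers", "Networking", "Kernel Core", "Tools", "Security", "IO/Storage"]

-- merged_data[component][cause] += count (with the preceding 0-initialisation)
def pvStepCauseA (merged : PySem.Dict String (PySem.Dict String Int)) (component : String)
    (ck : String × Int) : PySem.Dict String (PySem.Dict String Int) :=
  let inner := (merged.get? component).getD PySem.Dict.empty
  let inner := if inner.contains ck.1 then inner else inner.insert ck.1 0
  merged.insert component (inner.insert ck.1 (inner.getD ck.1 0 + ck.2))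

-- one iteration of 'for component, causes in data.items()'
def pvStepItemA (merged : PySem.Dict String (PySem.Dict String Int))
    (item : String × List (String × Int)) : PySem.Dict String (PySem.Dict String Int) :=
  let merged := if merged.contains item.1 = false ∧ item.1 ∈ pvComponents
                then merged.insert item.1 PySem.Dict.empty else merged
  if item.1 ∈ pvComponents then item.2.foldl (fun m ck => pvStepCauseA m item.1 ck) merged
  else merged

def merge_jsonl_data (data1 : List (String × List (String × Int))) (data2 : List (String × List (String × Int))) : List (String × List (String × Int)) :=
  let merged := ([data1, data2]).foldl (fun m data => data.foldl pvStepItemA m) PySem.Dict.empty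
  merged.items.map (fun p => (p.1, p.2.items))

-- ===== PORT B =====
-- append component to order if allowed and not yet seen
def pvOrderStep (order : List String) (c : String) : List String :=
  if c ∈ pvComponents ∧ c ∉ order then order ++ [c] else order

-- causes[cause] = causes.get(cause, 0) + count
def pvStepCauseB (causes : PySem.Dict String Int) (ck : String × Int) : PySem.Dict String Int :=
  causes.insert ck.1 (causes.getD ck.1 0 + ck.2)

-- sum the causes of one component over the sources, via d.get(component, {})
def pvCauses (sources : List (List (String × List (String × Int)))) (c : String) : PySem.Dict String Int :=
  sources.foldl (fun cs d => ((PySem.Dict.mk d).getD c []).foldl pvStepCauseB cs) PySem.Dict.empty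

def merge_jsonl_data_alt (data1 : List (String × List (String × Int))) (data2 : List (String × List (String × Int))) : List (String × List (String × Int)) :=
  let sources := [data1, data2]
  let order := sources.foldl (fun o d => d.foldl (fun o p => pvOrderStep o p.1) o) []
  let merged := order.foldl (fun r c => r.insert c (pvCauses sources c)) PySem.Dict.empty
  merged.items.map (fun p => (p.1, p.2.items))

-- ===== PRECONDITION & SPEC =====
-- Pre_ says the two arguments really are dicts (distinct keys at the outer level), which every
-- Python call satisfies by construction; on Lean-level lists with duplicate component keys neither
-- processing order corresponds to a Python input, so nothing is claimed there.
def Pre_merge_jsonl_data (data1 : List (String × List (String × Int))) (data2 : List (String × List (String × Int))) : Prop :=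
  (data1.map Prod.fst).Nodup ∧ (data2.map Prod.fst).Nodup
instance (data1 : List (String × List (String × Int))) (data2 : List (String × List (String × Int))) : Decidable (Pre_merge_jsonl_data data1 data2) := by unfold Pre_merge_jsonl_data; infer_instance

def pvWitness_merge_jsonl_data : (List (String × List (String × Int))) × (List (String × List (String × Int))) :=
  ([("Drivers", [("x", 1)]), ("junk", [("y", 2)])], [("File System", []), ("Drivers", [("x", 3), ("z", 1)])])

def Spec_merge_jsonl_data (data1 : List (String × List (String × Int))) (data2 : List (String × List (String × Int))) (out : List (String × List (String × Int))) : Prop := out = merge_jsonl_data_alt data1 data2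
instance (data1 : List (String × List (String × Int))) (data2 : List (String × List (String × Int))) (out : List (String × List (String × Int))) : Decidable (Spec_merge_jsonl_data data1 data2 out) := by unfold Spec_merge_jsonl_data; infer_instance

-- ===== CLAIM (what is proved, stated in full; the proofs are below) =====
def Claim_equal_merge_jsonl_data : Prop := ∀ (data1 : List (String × List (String × Int))) (data2 : List (String × List (String × Int))), Dom_merge_jsonl_data data1 data2 → Pre_merge_jsonl_data data1 data2 → Spec_merge_jsonl_data data1 data2 (merge_jsonl_data data1 data2)

-- ===== LEMMAS AND PROOFS =====

-- re-inserting a key with its current value is the identity (for nodup-keyed dicts)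
theorem pv_insert_get_self {κ ν : Type} [BEq κ] [LawfulBEq κ] (d : PySem.Dict κ ν) (k : κ) (v : ν)
    (hnd : d.keys.Nodup) (h : d.get? k = some v) : d.insert k v = d := by
  have hc : d.contains k = true := by rw [PySem.Dict.contains_eq_isSome_get?, h]; rfl
  apply PySem.Dict.ext
  rw [PySem.Dict.items_insert_of_contains d v hc]
  have hkv : (k, v) ∈ d.items := PySem.Dict.mem_items_of_get?_eq_some d h
  have hmap : (d.items.map Prod.fst).Nodup := by simpa [PySem.Dict.keys] using hnd
  conv_rhs => rw [← List.map_id d.items]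
  refine List.map_congr_left (fun p hp => ?_)
  by_cases hpk : p.1 = k
  · have : p = (k, v) := List.inj_on_of_nodup_map hmap hp hkv (by simpa using hpk)
    simp [this]
  · simp [hpk]

-- one A-side cause step on a dict of shape m.insert c w is one B-side cause step on w
theorem pv_step_eq (m : PySem.Dict String (PySem.Dict String Int)) (c : String)
    (w : PySem.Dict String Int) (ck : String × Int) :
    pvStepCauseA (m.insert c w) c ck = m.insert c (pvStepCauseB w ck) := by
  unfold pvStepCauseA pvStepCauseB
  simp only [PySem.Dict.get?_insert_self, Option.getD_some, PySem.Dict.insert_insert_self]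
  by_cases hw : w.contains ck.1 = true
  · simp [hw]
  · simp only [eq_false_of_ne_true hw, if_false, Bool.false_eq_true]
    rw [PySem.Dict.getD_of_not_contains w 0 (eq_false_of_ne_true hw)]
    simp [PySem.Dict.getD_insert_self, PySem.Dict.insert_insert_self]

-- A's inner cause-loop, started on a dict of shape m.insert c w, is B's cause-fold on w
theorem pv_inner_loop (causes : List (String × Int)) (m : PySem.Dict String (PySem.Dict String Int))
    (c : String) (w : PySem.Dict String Int) :
    causes.foldl (fun a ck => pvStepCauseA a c ck) (m.insert c w)
      = m.insert c (causes.foldl pvStepCauseB w) := by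
  induction causes generalizing w with
  | nil => rfl
  | cons ck rest ih => simp only [List.foldl_cons, pv_step_eq]; exact ih (pvStepCauseB w ck)

-- A's whole item step, for an allowed component, is one insert of a B-style cause-fold
theorem pv_stepA_char (m : PySem.Dict String (PySem.Dict String Int))
    (p : String × List (String × Int)) (hc : p.1 ∈ pvComponents) (hnd : m.keys.Nodup) :
    pvStepItemA m p = m.insert p.1 (p.2.foldl pvStepCauseB (m.getD p.1 PySem.Dict.empty)) := by
  unfold pvStepItemA
  by_cases hm : m.contains p.1 = true
  · simp only [hm, Bool.true_eq_false, false_and, if_false, if_pos hc]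
    have hsome : (m.get? p.1).isSome := by rw [← PySem.Dict.contains_eq_isSome_get?, hm]
    obtain ⟨w, hw⟩ := Option.isSome_iff_exists.mp hsome
    calc p.2.foldl (fun a ck => pvStepCauseA a p.1 ck) m
        = p.2.foldl (fun a ck => pvStepCauseA a p.1 ck) (m.insert p.1 w) := by
          rw [pv_insert_get_self m p.1 w hnd hw]
      _ = m.insert p.1 (p.2.foldl pvStepCauseB w) := pv_inner_loop ..
      _ = _ := by rw [PySem.Dict.getD_of_get?_eq_some m PySem.Dict.empty hw]
  · have hm' : m.contains p.1 = false := by cases h : m.contains p.1 with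
      | true => exact absurd h hm
      | false => rfl
    simp only [hm', hc, and_self, if_pos]
    rw [pv_inner_loop, PySem.Dict.getD_of_not_contains m PySem.Dict.empty hm']
theorem pv_stepA_skip (m : PySem.Dict String (PySem.Dict String Int))
    (p : String × List (String × Int)) (hc : p.1 ∉ pvComponents) : pvStepItemA m p = m := by
  unfold pvStepItemA; simp [hc]

-- B's order fold over one source (nodup keys) appends the new allowed components
theorem pv_order_fold (l : List (String × List (String × Int))) (o : List String)
    (hl : (l.map Prod.fst).Nodup) :
    l.foldl (fun o p => pvOrderStep o p.1) o
      = o ++ (l.map Prod.fst).filter (fun c => decide (c ∈ pvComponents ∧ c ∉ o)) := by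
  induction l generalizing o with
  | nil => simp
  | cons p rest ih =>
    rw [List.map_cons, List.nodup_cons] at hl
    have hnotin : p.1 ∉ rest.map Prod.fst := hl.1
    simp only [List.foldl_cons, List.map_cons, List.filter_cons]
    by_cases h : p.1 ∈ pvComponents ∧ p.1 ∉ o
    · have hstep : pvOrderStep o p.1 = o ++ [p.1] := by unfold pvOrderStep; rw [if_pos h]
      rw [hstep, ih _ hl.2, decide_eq_true h]
      have : (rest.map Prod.fst).filter (fun c => decide (c ∈ pvComponents ∧ c ∉ o ++ [p.1]))
           = (rest.map Prod.fst).filter (fun c => decide (c ∈ pvComponents ∧ c ∉ o)) := by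
        refine List.filter_congr (fun c hc => ?_)
        have hne : c ≠ p.1 := fun he => hnotin (he ▸ hc)
        simp [List.mem_append, hne]
      rw [this, List.append_assoc]; rfl
    · have hstep : pvOrderStep o p.1 = o := by unfold pvOrderStep; rw [if_neg h]
      rw [hstep, ih _ hl.2, decide_eq_false h]
      simp

-- keys of A's item fold over one source (nodup keys): new allowed components append
theorem pv_keysA (l : List (String × List (String × Int)))
    (m : PySem.Dict String (PySem.Dict String Int))
    (hl : (l.map Prod.fst).Nodup) (hm : m.keys.Nodup) :
    (l.foldl pvStepItemA m).keys
      = m.keys ++ (l.map Prod.fst).filter (fun c => decide (c ∈ pvComponents ∧ c ∉ m.keys)) := by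
  induction l generalizing m with
  | nil => simp
  | cons p rest ih =>
    rw [List.map_cons, List.nodup_cons] at hl
    have hnotin : p.1 ∉ rest.map Prod.fst := hl.1
    simp only [List.foldl_cons, List.map_cons, List.filter_cons]
    by_cases hc : p.1 ∈ pvComponents
    · rw [pv_stepA_char m p hc hm]
      set w := p.2.foldl pvStepCauseB (m.getD p.1 PySem.Dict.empty) with hw
      by_cases hmem : p.1 ∈ m.keys
      · have hcont : m.contains p.1 = true := by
          rw [PySem.Dict.contains_eq_decide_mem_keys]; exact decide_eq_true hmem
        have hkeys : (m.insert p.1 w).keys = m.keys := PySem.Dict.keys_insert_of_contains m w hcont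
        rw [ih _ hl.2 (by rw [hkeys]; exact hm), hkeys, decide_eq_false (by simp [hmem])]
        simp
      · have hcont : m.contains p.1 = false := by
          rw [PySem.Dict.contains_eq_decide_mem_keys]; exact decide_eq_false hmem
        have hkeys : (m.insert p.1 w).keys = m.keys ++ [p.1] :=
          PySem.Dict.keys_insert_of_not_contains m w hcont
        rw [ih _ hl.2 (by rw [hkeys]; exact (List.nodup_append).mpr ⟨hm, List.nodup_singleton _, by intro a ha b hb he; rw [List.mem_singleton] at hb; exact hmem ((he.trans hb) ▸ ha)⟩),
          hkeys, decide_eq_true ⟨hc, hmem⟩]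
        have : (rest.map Prod.fst).filter (fun c => decide (c ∈ pvComponents ∧ c ∉ m.keys ++ [p.1]))
             = (rest.map Prod.fst).filter (fun c => decide (c ∈ pvComponents ∧ c ∉ m.keys)) := by
          refine List.filter_congr (fun c hcm => ?_)
          have hne : c ≠ p.1 := fun he => hnotin (he ▸ hcm)
          simp [List.mem_append, hne]
        rw [this, List.append_assoc]; rfl
    · rw [pv_stepA_skip m p hc, ih _ hl.2 hm, decide_eq_false (by simp [hc])]
      simp

-- value of A's item fold at an allowed component: B's cause-fold over that source's entry
theorem pv_getA (l : List (String × List (String × Int)))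
    (m : PySem.Dict String (PySem.Dict String Int)) (c : String)
    (hl : (l.map Prod.fst).Nodup) (hm : m.keys.Nodup) (hc : c ∈ pvComponents) :
    (l.foldl pvStepItemA m).getD c PySem.Dict.empty
      = ((PySem.Dict.mk l).getD c []).foldl pvStepCauseB (m.getD c PySem.Dict.empty) := by
  induction l generalizing m with
  | nil => rfl
  | cons p rest ih =>
    rw [List.map_cons, List.nodup_cons] at hl
    have hnotin : p.1 ∉ rest.map Prod.fst := hl.1
    have hgd : (PySem.Dict.mk (p :: rest)).getD c []
        = if (p.1 == c) = true then p.2 else (PySem.Dict.mk rest).getD c [] := by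
      rw [PySem.Dict.getD_eq_get?_getD, PySem.Dict.get?_mk_cons]
      split_ifs with h
      · rfl
      · rw [PySem.Dict.getD_eq_get?_getD]
    simp only [List.foldl_cons]
    by_cases hpc : p.1 ∈ pvComponents
    · rw [pv_stepA_char m p hpc hm]
      set w := p.2.foldl pvStepCauseB (m.getD p.1 PySem.Dict.empty) with hwdef
      have hnd' : (m.insert p.1 w).keys.Nodup := PySem.Dict.nodup_keys_insert m p.1 w hm
      rw [ih _ hl.2 hnd']
      by_cases hcp : c = p.1
      · subst hcp
        have hrest : (PySem.Dict.mk rest).getD p.1 [] = [] := by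
          refine PySem.Dict.getD_of_not_contains _ _ ?_
          rw [PySem.Dict.contains_eq_decide_mem_keys, PySem.Dict.keys_mk]
          exact decide_eq_false (by simpa using hnotin)
        rw [hrest, hgd, if_pos (by simp), PySem.Dict.getD_insert_self]
        simp only [List.foldl_nil]
        exact hwdef
      · rw [PySem.Dict.getD_insert_of_ne m w PySem.Dict.empty hcp, hgd,
          if_neg (by simpa using fun h => hcp h.symm)]
    · rw [pv_stepA_skip m p hpc]
      have hne : (p.1 == c) = false := by
        refine beq_eq_false_iff_ne.mpr (fun he => hpc (he ▸ hc))
      rw [ih _ hl.2 hm, hgd, hne]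
      rfl

-- ===== VERDICT (by name: the statement is the Claim_ definition above) =====
theorem merge_jsonl_data_spec : Claim_equal_merge_jsonl_data := by
  intro data1 data2 _ hpre
  obtain ⟨h1, h2⟩ := hpre
  unfold Spec_merge_jsonl_data merge_jsonl_data merge_jsonl_data_alt
  simp only [List.foldl_cons, List.foldl_nil]
  -- the first pass over data1, in both programs
  have hkeys0 : (PySem.Dict.empty : PySem.Dict String (PySem.Dict String Int)).keys = [] := rfl
  set o1 : List String :=
    (data1.map Prod.fst).filter (fun c => decide (c ∈ pvComponents ∧ c ∉ ([] : List String))) with ho1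
  have hord1 : data1.foldl (fun o p => pvOrderStep o p.1) [] = o1 := by
    rw [pv_order_fold data1 [] h1]; rfl
  set m1 := data1.foldl pvStepItemA PySem.Dict.empty with hm1
  have hk1 : m1.keys = o1 := by
    rw [hm1, pv_keysA data1 PySem.Dict.empty h1 (PySem.Dict.nodup_keys_empty ..), hkeys0]; rfl
  have hnd1 : m1.keys.Nodup := by rw [hk1, ho1]; exact h1.filter _
  -- the second pass over data2
  set o2 : List String :=
    (data2.map Prod.fst).filter (fun c => decide (c ∈ pvComponents ∧ c ∉ o1)) with ho2
  have hord : data2.foldl (fun o p => pvOrderStep o p.1)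
      (data1.foldl (fun o p => pvOrderStep o p.1) []) = o1 ++ o2 := by
    rw [hord1, pv_order_fold data2 o1 h2]
  set m2 := data2.foldl pvStepItemA m1 with hm2
  have hk2 : m2.keys = o1 ++ o2 := by
    rw [hm2, pv_keysA data2 m1 h2 hnd1, hk1]
  have hnd2 : m2.keys.Nodup := by
    rw [hk2]
    refine (List.nodup_append).mpr ⟨by rw [ho1]; exact h1.filter _, by rw [ho2]; exact h2.filter _, ?_⟩
    intro a ha b hb he
    exact (of_decide_eq_true (List.mem_filter.mp (ho2 ▸ hb)).2).2 (he ▸ ha)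
  have hndo : (o1 ++ o2).Nodup := hk2 ▸ hnd2
  -- both items lists are the order list mapped through the same per-component value
  have hAitems : m2.items = (o1 ++ o2).map (fun c => (c, m2.getD c PySem.Dict.empty)) := by
    rw [← hk2]; exact PySem.Dict.items_eq_map_keys m2 hnd2 PySem.Dict.empty
  have hBitems : ((o1 ++ o2).foldl (fun r c => r.insert c (pvCauses [data1, data2] c))
      PySem.Dict.empty).items = (o1 ++ o2).map (fun c => (c, pvCauses [data1, data2] c)) := by
    rw [PySem.Dict.items_foldl_insert_fresh (o1 ++ o2) (fun c => c)
      (fun c => pvCauses [data1, data2] c) PySem.Dict.empty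
      (fun a _ => PySem.Dict.contains_empty ..) (by simpa using hndo)]
    rfl
  rw [hord, hAitems, hBitems]
  simp only [List.map_map]
  refine List.map_congr_left (fun c hc => ?_)
  have hccomp : c ∈ pvComponents := by
    rcases List.mem_append.mp hc with h | h
    · exact (of_decide_eq_true (List.mem_filter.mp (ho1 ▸ h)).2).1
    · exact (of_decide_eq_true (List.mem_filter.mp (ho2 ▸ h)).2).1
  have hval : m2.getD c PySem.Dict.empty = pvCauses [data1, data2] c := by
    rw [hm2, pv_getA data2 m1 c h2 hnd1 hccomp, hm1,
      pv_getA data1 PySem.Dict.empty c h1 (PySem.Dict.nodup_keys_empty ..) hccomp]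
    rfl
  simp [hval]
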